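-- pv_equiv track=rewrite | github.com/paulmillerd/Advent-of-Code-2020 | Day 5/question2.py | narrowDownRecursively
-- ===== SOURCE A (Python) =====
-- def narrowDownRecursively(str, min, max):
--     if len(str) == 0:
--         return max
--     c = str[0]
--     if c == 'F' or c == 'L':
--         newMax = max - int((max - min + 1) / 2)
--         return narrowDownRecursively(str[1:], min, newMax)
--     else:
--         newMin = min + int((max - min + 1) / 2)
--         return narrowDownRecursively(str[1:], newMin, max)
-- ===== SOURCE B (Python) =====
-- def narrowDownRecursively(str, min, max):
--     lo, hi = min, max
--     for c in str:
--         half = int((hi - lo + 1) / 2)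
--         if c == 'F' or c == 'L':
--             hi = hi - half
--         else:
--             lo = lo + half
--     return hi
-- ===== Notes on version B (the rewrite author's own statement) =====
-- stated objective: faster
-- what changed: Replaces the recursion with repeated string slicing by a single iterative loop over the characters maintaining a (lo, hi) pair, returning hi at the end.
import Mathlib
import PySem

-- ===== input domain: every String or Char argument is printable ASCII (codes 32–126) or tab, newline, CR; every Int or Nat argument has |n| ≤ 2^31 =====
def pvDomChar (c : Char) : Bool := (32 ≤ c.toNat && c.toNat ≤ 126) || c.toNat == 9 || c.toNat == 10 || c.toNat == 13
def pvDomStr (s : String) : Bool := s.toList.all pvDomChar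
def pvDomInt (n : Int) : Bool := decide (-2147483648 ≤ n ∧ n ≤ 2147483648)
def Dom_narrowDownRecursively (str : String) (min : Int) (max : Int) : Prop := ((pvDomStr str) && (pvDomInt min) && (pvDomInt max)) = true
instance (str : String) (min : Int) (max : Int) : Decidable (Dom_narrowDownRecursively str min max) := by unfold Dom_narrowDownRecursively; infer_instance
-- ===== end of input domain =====

-- B replaces A's recursion-with-slicing by one iterative loop over the characters keeping a (lo, hi) pair; same return value.
-- int((max-min+1)/2) is exact float halving then truncation toward zero: on the stated |n| ≤ 2^31 domain this equals Int.tdiv _ 2.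

-- ===== PORT A =====
def narrowDownRecursivelyGo (l : List Char) (min : Int) (max : Int) : Int :=
  match l with
  | [] => max
  | c :: rest =>
    if c = 'F' ∨ c = 'L' then
      narrowDownRecursivelyGo rest min (max - (max - min + 1).tdiv 2)
    else
      narrowDownRecursivelyGo rest (min + (max - min + 1).tdiv 2) max

def narrowDownRecursively (str : String) (min : Int) (max : Int) : Int :=
  narrowDownRecursivelyGo str.toList min max

-- ===== PORT B =====
def narrowDownStep (p : Int × Int) (c : Char) : Int × Int :=
  let half := (p.2 - p.1 + 1).tdiv 2
  if c = 'F' ∨ c = 'L' then (p.1, p.2 - half) else (p.1 + half, p.2)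

def narrowDownRecursively_alt (str : String) (min : Int) (max : Int) : Int :=
  (str.toList.foldl narrowDownStep (min, max)).2

-- ===== PRECONDITION & SPEC =====
def Spec_narrowDownRecursively (str : String) (min : Int) (max : Int) (out : Int) : Prop := out = narrowDownRecursively_alt str min max
instance (str : String) (min : Int) (max : Int) (out : Int) : Decidable (Spec_narrowDownRecursively str min max out) := by unfold Spec_narrowDownRecursively; infer_instance

-- ===== CLAIM (what is proved, stated in full; the proofs are below) =====
def Claim_equal_narrowDownRecursively : Prop := ∀ (str : String) (min : Int) (max : Int), Dom_narrowDownRecursively str min max → Spec_narrowDownRecursively str min max (narrowDownRecursively str min max)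

-- ===== LEMMAS AND PROOFS =====
theorem narrowDownGo_eq_foldl (l : List Char) (mn mx : Int) :
    narrowDownRecursivelyGo l mn mx = (l.foldl narrowDownStep (mn, mx)).2 := by
  induction l generalizing mn mx with
  | nil => rfl
  | cons c rest ih =>
    simp only [narrowDownRecursivelyGo, List.foldl_cons, narrowDownStep]
    by_cases h : c = 'F' ∨ c = 'L' <;> simp [h, ih]

-- ===== VERDICT (by name: the statement is the Claim_ definition above) =====
theorem narrowDownRecursively_spec : Claim_equal_narrowDownRecursively := by
  intro str mn mx _
  unfold Spec_narrowDownRecursively narrowDownRecursively narrowDownRecursively_alt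
  exact narrowDownGo_eq_foldl _ _ _
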